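-- pv_equiv track=rewrite | github.com/Perlence/codewars | next_bigger_number_with_the_same_digits.py | split_decreasing_tail
-- ===== SOURCE A (Python) =====
-- def split_decreasing_tail(seq):
--     tail = []
--     for i, _ in enumerate(seq, start=1):
--         n = seq[-i]
--         if tail and n < tail[0]:
--             return list(seq[:-i+1]), tail
--         tail.insert(0, n)
--     return [], tail
-- ===== SOURCE B (Python) =====
-- def split_decreasing_tail(seq):
--     k = len(seq) - 1
--     while k > 0 and seq[k - 1] >= seq[k]:
--         k -= 1
--     if k <= 0:
--         return [], list(seq)
--     return list(seq[:k]), list(seq[k:])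
-- ===== Notes on version B (the rewrite author's own statement) =====
-- stated objective: faster
-- what changed: B replaces A's forward enumeration with repeated tail.insert(0,...) and negative-index slicing by a single reverse index scan for the pivot followed by two O(n) slices.
import Mathlib
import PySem

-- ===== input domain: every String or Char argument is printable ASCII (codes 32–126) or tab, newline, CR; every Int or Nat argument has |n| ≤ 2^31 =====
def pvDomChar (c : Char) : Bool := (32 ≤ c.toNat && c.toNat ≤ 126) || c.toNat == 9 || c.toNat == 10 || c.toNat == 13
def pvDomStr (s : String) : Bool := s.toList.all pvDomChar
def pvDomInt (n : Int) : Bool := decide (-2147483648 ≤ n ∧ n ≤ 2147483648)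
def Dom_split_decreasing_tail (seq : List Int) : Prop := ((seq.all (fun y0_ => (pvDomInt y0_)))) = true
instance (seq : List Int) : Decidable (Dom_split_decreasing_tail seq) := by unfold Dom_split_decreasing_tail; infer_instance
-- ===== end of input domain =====

-- B replaces A's O(n^2) forward loop with tail.insert(0, ...) by a single O(n) reverse index
-- scan for the pivot followed by two slices; equivalence of the return values is proved below.

-- ===== PORT A =====
-- loop body of A: at iteration i (1-based, i ≤ len seq), n = seq[-i]; if tail and n < tail[0]
-- return (list(seq[:-i+1]), tail); else tail.insert(0, n) and continue; after the loop ([], tail).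
def splitGoA (seq : List Int) (tail : List Int) (i : Nat) : List Int × List Int :=
  if i ≤ seq.length then
    match PySem.List.pyGet? seq (-(i : Int)) with
    | none => ([], tail)   -- unreachable: 1 ≤ i ≤ len seq, so seq[-i] exists
    | some n =>
      match tail with
      | t0 :: _ =>
        if n < t0 then (PySem.List.slice seq none (some (-(i : Int) + 1)), tail)
        else splitGoA seq (n :: tail) (i + 1)
      | [] => splitGoA seq (n :: tail) (i + 1)
  else ([], tail)
termination_by seq.length + 1 - i

def split_decreasing_tail (seq : List Int) : List Int × List Int :=
  splitGoA seq [] 1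

-- ===== PORT B =====
-- while k > 0 and seq[k-1] >= seq[k]: k -= 1   (indices are in range wherever B calls this,
-- so List.getD is exact for Python's seq[k-1], seq[k])
def splitFindK (seq : List Int) : Nat → Nat
  | 0 => 0
  | k + 1 => if seq.getD k 0 ≥ seq.getD (k + 1) 0 then splitFindK seq k else k + 1

def split_decreasing_tail_alt (seq : List Int) : List Int × List Int :=
  let k := splitFindK seq (seq.length - 1)
  if k = 0 then ([], seq)
  else (seq.take k, seq.drop k)   -- list(seq[:k]), list(seq[k:]) with 0 < k < len seq

-- ===== PRECONDITION & SPEC =====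
def Spec_split_decreasing_tail (seq : List Int) (out : List Int × List Int) : Prop := out = split_decreasing_tail_alt seq
instance (seq : List Int) (out : List Int × List Int) : Decidable (Spec_split_decreasing_tail seq out) := by unfold Spec_split_decreasing_tail; infer_instance

-- ===== CLAIM (what is proved, stated in full; the proofs are below) =====
def Claim_equal_split_decreasing_tail : Prop := ∀ (seq : List Int), Dom_split_decreasing_tail seq → Spec_split_decreasing_tail seq (split_decreasing_tail seq)

-- ===== LEMMAS AND PROOFS =====

-- shared result shape of B
def splitRes (seq : List Int) (k : Nat) : List Int × List Int :=
  if k = 0 then ([], seq) else (seq.take k, seq.drop k)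

lemma alt_eq_res (seq : List Int) :
    split_decreasing_tail_alt seq = splitRes seq (splitFindK seq (seq.length - 1)) := rfl

-- main invariant: entering A's loop at iteration i = n + 1 - j with tail = seq.drop j
-- (0 ≤ j < n) yields B's result for the pivot scan started at index j.
lemma goA_eq (seq : List Int) :
    ∀ j : Nat, j < seq.length →
      splitGoA seq (seq.drop j) (seq.length + 1 - j) = splitRes seq (splitFindK seq j) := by
  intro j
  induction j with
  | zero =>
    intro _
    rw [splitGoA.eq_def]
    simp [splitRes, splitFindK]
  | succ j ih =>
    intro hj
    have hj' : j < seq.length := by omega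
    have hlen : seq.length + 1 - (j + 1) = seq.length - j := by omega
    rw [splitGoA.eq_def, hlen, if_pos (by omega : seq.length - j ≤ seq.length)]
    rw [PySem.List.pyGet?_neg_natCast seq (seq.length - j) (by omega) (by omega)]
    have hidx : seq.length - (seq.length - j) = j := by omega
    rw [hidx, List.getElem?_eq_getElem hj', List.drop_eq_getElem_cons hj]
    dsimp only
    have hgd1 : seq.getD j 0 = seq[j] := List.getD_eq_getElem seq 0 hj'
    have hgd2 : seq.getD (j + 1) 0 = seq[j + 1] := List.getD_eq_getElem seq 0 hj
    by_cases hc : seq[j] < seq[j + 1]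
    · rw [if_pos hc]
      have hk : (-((seq.length - j : Nat) : Int) + 1) = -(((seq.length - j - 1 : Nat)) : Int) := by
        omega
      rw [hk, PySem.List.slice_to_neg_natCast seq (seq.length - j - 1) (by omega)]
      have ht : seq.length - (seq.length - j - 1) = j + 1 := by omega
      rw [ht, ← List.drop_eq_getElem_cons hj]
      rw [splitFindK, hgd1, hgd2, if_neg (by omega), splitRes, if_neg (by omega)]
    · rw [if_neg hc]
      rw [← List.drop_eq_getElem_cons hj, ← List.drop_eq_getElem_cons hj']
      have h2 : seq.length - j + 1 = seq.length + 1 - j := by omega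
      rw [h2, ih hj', splitFindK, hgd1, hgd2, if_pos (by omega)]

theorem split_decreasing_tail_spec_aux (seq : List Int) :
    split_decreasing_tail seq = split_decreasing_tail_alt seq := by
  cases seq with
  | nil =>
    rw [split_decreasing_tail, splitGoA.eq_def]
    simp [split_decreasing_tail_alt, splitFindK]
  | cons x t =>
    have h1 : 1 ≤ (x :: t).length := by simp
    rw [split_decreasing_tail, splitGoA.eq_def, if_pos h1]
    rw [PySem.List.pyGet?_neg_natCast (x :: t) 1 (by omega) h1]
    have hlt : (x :: t).length - 1 < (x :: t).length := by omega
    rw [List.getElem?_eq_getElem hlt]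
    dsimp only
    have hdrop : (x :: t).drop ((x :: t).length - 1)
        = (x :: t)[(x :: t).length - 1] :: (x :: t).drop ((x :: t).length - 1 + 1) :=
      List.drop_eq_getElem_cons hlt
    have hd2 : (x :: t).length - 1 + 1 = (x :: t).length := by omega
    rw [hd2, List.drop_length] at hdrop
    rw [← hdrop]
    have h2 : (1 + 1 : Nat) = (x :: t).length + 1 - ((x :: t).length - 1) := by omega
    rw [h2]
    exact (goA_eq (x :: t) ((x :: t).length - 1) (by omega)).trans (alt_eq_res (x :: t)).symm

-- ===== VERDICT (by name: the statement is the Claim_ definition above) =====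
theorem split_decreasing_tail_spec : Claim_equal_split_decreasing_tail := by
  intro seq _
  exact split_decreasing_tail_spec_aux seq
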